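-- pv_equiv track=rewrite | github.com/abertoni27/AIAgent | citation_manager.py | _generate_mla_works_cited
-- ===== SOURCE A (Python) =====
-- from typing import Dict, List, Any, Tuple
--
-- def _generate_mla_works_cited(citations: List[Dict[str, Any]]) -> str:
--     """
--     Generate MLA format works cited page
--     """
--     works_cited = "Works Cited\n\n"
--
--     # Group citations by author
--     author_citations = {}
--     for citation in citations:
--         author = citation.get('author', 'Unknown Author')
--         if author not in author_citations:
--             author_citations[author] = []
--         author_citations[author].append(citation)
--
--     # Generate entries
--     for author, author_cits in author_citations.items():
--         for i, citation in enumerate(author_cits):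
--             if i == 0:
--                 # First citation for this author
--                 works_cited += f"{author}. "
--             else:
--                 # Subsequent citations - use dashes
--                 works_cited += "---. "
--
--             # Add title if available
--             if citation.get('title'):
--                 works_cited += f'"{citation["title"]}." '
--
--             # Add source if available
--             if citation.get('source'):
--                 works_cited += f"{citation['source']}, "
--
--             # Add year if available
--             if citation.get('year'):
--                 works_cited += f"{citation['year']}, "
--
--             # Add page if available
--             if citation.get('page'):
--                 works_cited += f"p. {citation['page']}.\n\n"
--             else:
--                 works_cited += ".\n\n"
--
--     return works_cited
-- ===== SOURCE B (Python) =====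
-- def _entry_body(citation):
--     title = '"%s." ' % citation['title'] if citation.get('title') else ''
--     source = '%s, ' % citation['source'] if citation.get('source') else ''
--     year = '%s, ' % citation['year'] if citation.get('year') else ''
--     page = 'p. %s.\n\n' % citation['page'] if citation.get('page') else '.\n\n'
--     return title + source + year + page
--
--
-- def _generate_mla_works_cited(citations):
--     # Pass 1: distinct authors in order of first appearance.
--     authors = []
--     for citation in citations:
--         author = citation.get('author', 'Unknown Author')
--         if author not in authors:
--             authors.append(author)
--     # Pass 2: for each author, re-scan for that author's citations and emit its block.
--     out = "Works Cited\n\n"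
--     for author in authors:
--         group = [c for c in citations if c.get('author', 'Unknown Author') == author]
--         for i, citation in enumerate(group):
--             out += (f"{author}. " if i == 0 else "---. ") + _entry_body(citation)
--     return out
-- ===== Notes on version B (the rewrite author's own statement) =====
-- stated objective: alternative
-- what changed: Replaces A's single-pass dict grouping with a distinct-authors list built in one scan followed by a per-author filtering re-scan, and assembles each entry's body as one string instead of incremental appends.
import Mathlib
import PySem

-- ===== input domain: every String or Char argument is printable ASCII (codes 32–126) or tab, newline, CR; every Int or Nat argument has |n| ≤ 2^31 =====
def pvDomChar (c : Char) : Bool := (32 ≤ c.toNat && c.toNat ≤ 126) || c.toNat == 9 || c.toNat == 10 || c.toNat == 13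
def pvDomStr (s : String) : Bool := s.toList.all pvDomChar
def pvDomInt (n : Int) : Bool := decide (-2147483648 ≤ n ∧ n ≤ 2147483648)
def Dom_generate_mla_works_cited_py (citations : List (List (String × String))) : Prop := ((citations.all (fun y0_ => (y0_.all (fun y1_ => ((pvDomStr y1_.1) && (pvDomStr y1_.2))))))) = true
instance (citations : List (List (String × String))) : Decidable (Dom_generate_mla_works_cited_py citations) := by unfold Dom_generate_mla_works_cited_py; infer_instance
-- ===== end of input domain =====

-- B replaces A's single-pass dict grouping by a distinct-authors scan plus a per-author
-- filtering re-scan (a different traversal shape, same cost class; not claimed faster).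


-- citation.get(key, default): first-match lookup in the citation dict (used by both Pythons)
def pvGet (c : List (String × String)) (k d : String) : String :=
  (PySem.Dict.mk c).getD k d

-- ===== PORT A =====
def generate_mla_works_cited_py (citations : List (List (String × String))) : String :=
  let works_cited := "Works Cited\n\n"
  let author_citations :=
    citations.foldl
      (fun d citation =>
        let author := pvGet citation "author" "Unknown Author"
        let d := if d.contains author then d
                 else d.insert author ([] : List (List (String × String)))
        d.modify author [] (fun l => l ++ [citation]))
      PySem.Dict.empty
  author_citations.items.foldl
    (fun w p =>
      (PySem.List.enumerate p.2).foldl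
        (fun w ic =>
          let w := if ic.1 == 0 then w ++ p.1 ++ ". " else w ++ "---. "
          let w := if pvGet ic.2 "title" "" ≠ "" then w ++ "\"" ++ pvGet ic.2 "title" "" ++ ".\" " else w
          let w := if pvGet ic.2 "source" "" ≠ "" then w ++ pvGet ic.2 "source" "" ++ ", " else w
          let w := if pvGet ic.2 "year" "" ≠ "" then w ++ pvGet ic.2 "year" "" ++ ", " else w
          if pvGet ic.2 "page" "" ≠ "" then w ++ "p. " ++ pvGet ic.2 "page" "" ++ ".\n\n"
          else w ++ ".\n\n")
        w)
    works_cited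

-- ===== PORT B =====
def pvEntryBody (c : List (String × String)) : String :=
  let title := if pvGet c "title" "" ≠ "" then "\"" ++ pvGet c "title" "" ++ ".\" " else ""
  let source := if pvGet c "source" "" ≠ "" then pvGet c "source" "" ++ ", " else ""
  let year := if pvGet c "year" "" ≠ "" then pvGet c "year" "" ++ ", " else ""
  let page := if pvGet c "page" "" ≠ "" then "p. " ++ pvGet c "page" "" ++ ".\n\n" else ".\n\n"
  title ++ source ++ year ++ page

def generate_mla_works_cited_py_alt (citations : List (List (String × String))) : String :=
  let authors :=
    citations.foldl
      (fun acc citation =>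
        let author := pvGet citation "author" "Unknown Author"
        if author ∈ acc then acc else acc ++ [author])
      ([] : List String)
  authors.foldl
    (fun w author =>
      (PySem.List.enumerate
          (citations.filter (fun c => pvGet c "author" "Unknown Author" == author))).foldl
        (fun w ic =>
          w ++ ((if ic.1 == 0 then author ++ ". " else "---. ") ++ pvEntryBody ic.2))
        w)
    "Works Cited\n\n"

-- ===== PRECONDITION & SPEC =====
def Spec_generate_mla_works_cited_py (citations : List (List (String × String))) (out : String) : Prop := out = generate_mla_works_cited_py_alt citations
instance (citations : List (List (String × String))) (out : String) : Decidable (Spec_generate_mla_works_cited_py citations out) := by unfold Spec_generate_mla_works_cited_py; infer_instance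

-- ===== CLAIM (what is proved, stated in full; the proofs are below) =====
def Claim_equal_generate_mla_works_cited_py : Prop := ∀ (citations : List (List (String × String))), Dom_generate_mla_works_cited_py citations → Spec_generate_mla_works_cited_py citations (generate_mla_works_cited_py citations)

-- ===== LEMMAS AND PROOFS =====

-- proof-side abbreviations
def pvAuth (c : List (String × String)) : String := pvGet c "author" "Unknown Author"

def pvAuthors (l : List (List (String × String))) : List String :=
  l.foldl (fun acc c => if pvAuth c ∈ acc then acc else acc ++ [pvAuth c]) []

-- A's "if key missing insert [] then append" dict step is a plain modify
theorem ins_ins {ν : Type} (d : PySem.Dict String ν) (a : String) (u v : ν)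
    (h : d.contains a = false) : (d.insert a u).insert a v = d.insert a v := by
  have hany : (d.items.any fun p => p.1 == a) = false := by
    simpa [PySem.Dict.contains] using h
  have hall : ∀ p ∈ d.items, (p.1 == a) = false := by
    simpa [List.any_eq_true] using hany
  have hmap : List.map (fun p => if (p.1 == a) = true then (a, v) else p) d.items
      = List.map id d.items :=
    List.map_congr_left (fun p hp => by simp [hall p hp])
  simp only [PySem.Dict.insert, PySem.Dict.contains, hany,
    Bool.false_eq_true, if_false, List.any_append, List.any_cons, List.any_nil,
    beq_self_eq_true, Bool.or_true, Bool.true_or, if_true, List.map_append,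
    List.map_cons, List.map_nil, hmap, List.map_id]

theorem pvStep_eq {ν : Type} (d : PySem.Dict String ν) (a : String) (dflt : ν) (f : ν → ν) :
    (if d.contains a then d else d.insert a dflt).modify a dflt f = d.modify a dflt f := by
  by_cases h : d.contains a
  · simp [h]
  · simp only [h, Bool.false_eq_true, if_false]
    rw [PySem.Dict.modify, PySem.Dict.modify, PySem.Dict.getD_insert_self,
      PySem.Dict.getD_of_not_contains d dflt (by simpa using h),
      ins_ins d a dflt _ (by simpa using h)]

-- membership in the distinct-author list
theorem mem_authsAux (l : List (List (String × String))) :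
    ∀ (acc : List String) (a : String),
    a ∈ l.foldl (fun acc c => if pvAuth c ∈ acc then acc else acc ++ [pvAuth c]) acc
      ↔ a ∈ acc ∨ a ∈ l.map pvAuth := by
  induction l with
  | nil => simp
  | cons c l ih =>
    intro acc a
    simp only [List.foldl_cons, List.map_cons, List.mem_cons]
    rw [ih]
    by_cases h : pvAuth c ∈ acc <;> aesop

-- the per-author value of A's grouping dict
theorem getD_pvFold (l : List (List (String × String))) (a : String) :
    (l.foldl (fun d c => d.modify (pvAuth c) [] (fun g => g ++ [c])) PySem.Dict.empty).getD a []
      = l.filter (fun c => pvAuth c == a) := by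
  have h1 : l.foldl (fun d c => d.modify (pvAuth c) [] (fun g => g ++ [c])) PySem.Dict.empty
      = (l.map (fun c => (pvAuth c, c))).foldl
          (fun d p => d.modify p.1 [] (fun g => g ++ [p.2])) PySem.Dict.empty := by
    rw [List.foldl_map]
  rw [h1, PySem.Dict.getD_foldl_modify_append, PySem.Dict.getD_empty, List.filter_map]
  simp [Function.comp_def]

-- the grouping invariant: A's dict's items are B's (author, filtered group) pairs
theorem items_fold (l : List (List (String × String))) :
    (l.foldl (fun d c => d.modify (pvAuth c) [] (fun g => g ++ [c])) PySem.Dict.empty).items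
      = (pvAuthors l).map (fun a => (a, l.filter (fun c => pvAuth c == a))) := by
  induction l using List.reverseRecOn with
  | nil => rfl
  | append_singleton l c ih =>
    have hkeys : (l.foldl (fun d c => d.modify (pvAuth c) [] (fun g => g ++ [c]))
        PySem.Dict.empty).keys = pvAuthors l := by
      simp [PySem.Dict.keys, ih, List.map_map, Function.comp_def]
    have hauths : pvAuthors (l ++ [c])
        = if pvAuth c ∈ pvAuthors l then pvAuthors l else pvAuthors l ++ [pvAuth c] := by
      simp [pvAuthors, List.foldl_append]
    have hcontains : (l.foldl (fun d c => d.modify (pvAuth c) [] (fun g => g ++ [c]))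
        PySem.Dict.empty).contains (pvAuth c) = decide (pvAuth c ∈ pvAuthors l) := by
      rw [PySem.Dict.contains_eq_decide_mem_keys, hkeys]
    rw [List.foldl_append, List.foldl_cons, List.foldl_nil, PySem.Dict.modify, getD_pvFold]
    by_cases hmem : pvAuth c ∈ pvAuthors l
    · rw [PySem.Dict.items_insert_of_contains _ _ (by rw [hcontains]; simpa), ih,
        hauths, if_pos hmem, List.map_map]
      refine List.map_congr_left ?_
      intro a ha
      simp only [Function.comp_def, List.filter_append, List.filter_cons, List.filter_nil]
      by_cases hac : a = pvAuth c
      · subst hac; simp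
      · have h1 : (a == pvAuth c) = false := by simpa using hac
        have h2 : (pvAuth c == a) = false := by simpa using (Ne.symm hac)
        simp [h1, h2]
    · have hfilnil : l.filter (fun c' => pvAuth c' == pvAuth c) = [] := by
        rw [List.filter_eq_nil_iff]
        intro x hx
        simp only [beq_iff_eq]
        intro hax
        exact hmem ((mem_authsAux l [] (pvAuth c)).2 (Or.inr (by
          simpa using ⟨x, hx, hax⟩)))
      rw [PySem.Dict.items_insert_of_not_contains _ _ (by rw [hcontains]; simpa), ih,
        hauths, if_neg hmem, List.map_append]
      congr 1
      · refine List.map_congr_left ?_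
        intro a ha
        have h2 : (pvAuth c == a) = false := by
          simp only [beq_eq_false_iff_ne, ne_eq]
          intro hax
          exact hmem (hax ▸ ha)
        simp [List.filter_append, h2]
      · simp [List.filter_append, List.filter_cons, hfilnil]

-- ===== VERDICT (by name: the statement is the Claim_ definition above) =====
theorem generate_mla_works_cited_py_spec : Claim_equal_generate_mla_works_cited_py := by
  intro citations _
  show generate_mla_works_cited_py citations = generate_mla_works_cited_py_alt citations
  unfold generate_mla_works_cited_py generate_mla_works_cited_py_alt
  have hstep : (fun (d : PySem.Dict String (List (List (String × String)))) citation =>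
        let author := pvGet citation "author" "Unknown Author"
        let d := if d.contains author then d
                 else d.insert author ([] : List (List (String × String)))
        d.modify author [] (fun l => l ++ [citation]))
      = fun d c => d.modify (pvAuth c) [] (fun g => g ++ [c]) :=
    funext fun d => funext fun c => pvStep_eq d (pvAuth c) [] _
  simp only [hstep, items_fold, List.foldl_map]
  show (pvAuthors citations).foldl _ _ = (pvAuthors citations).foldl _ _
  congr 1
  funext w a
  congr 1
  funext w ic
  simp only [pvEntryBody]
  split_ifs <;> (apply String.ext; simp [String.toList_append, List.append_assoc])
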